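-- pv_equiv track=rewrite | github.com/sd4y/jungle_algo | week3/test2.py | dfs
-- ===== SOURCE A (Python) =====
-- def dfs(graph, start):
--     visited = []
--     back_edges = set()
--     stack = [start]
--     while stack:
--         node = stack.pop()
--         if node not in visited:
--             visited.append(node)
--             for neighbor in sorted(graph.get(node, []), reverse=True):
--                 if neighbor not in visited:
--                     stack.append(neighbor)
--                 else:
--                     edge = tuple(sorted((node, neighbor)))
--                     back_edges.add(edge)
--     return visited, sorted(list(back_edges))
-- ===== SOURCE B (Python) =====
-- def dfs(graph, start):
--     # Phase 1: stack-based traversal recording only the visit order,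
--     # with pos[node] = index of node in the visit order.
--     visited = []
--     pos = {}
--     stack = [start]
--     while stack:
--         node = stack.pop()
--         if node not in pos:
--             pos[node] = len(visited)
--             visited.append(node)
--             for neighbor in sorted(graph.get(node, []), reverse=True):
--                 if neighbor not in pos:
--                     stack.append(neighbor)
--     # Phase 2: re-scan every edge of the visited subgraph; an edge closes a
--     # cycle iff its target was visited no later than its source.
--     back_edges = set()
--     for node in visited:
--         for neighbor in graph.get(node, []):
--             if neighbor in pos and pos[neighbor] <= pos[node]:
--                 back_edges.add((node, neighbor) if node <= neighbor else (neighbor, node))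
--     return visited, sorted(back_edges)
-- ===== Notes on version B (the rewrite author's own statement) =====
-- stated objective: alternative
-- what changed: Traversal and back-edge detection are separated: phase 1 runs the stack DFS recording only the visit order in a dict pos (node -> visit index), phase 2 re-scans every edge of the visited nodes and keeps those whose target's index in pos is <= the source's index; the inline else-branch set accumulation of A disappears.
import Mathlib
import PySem

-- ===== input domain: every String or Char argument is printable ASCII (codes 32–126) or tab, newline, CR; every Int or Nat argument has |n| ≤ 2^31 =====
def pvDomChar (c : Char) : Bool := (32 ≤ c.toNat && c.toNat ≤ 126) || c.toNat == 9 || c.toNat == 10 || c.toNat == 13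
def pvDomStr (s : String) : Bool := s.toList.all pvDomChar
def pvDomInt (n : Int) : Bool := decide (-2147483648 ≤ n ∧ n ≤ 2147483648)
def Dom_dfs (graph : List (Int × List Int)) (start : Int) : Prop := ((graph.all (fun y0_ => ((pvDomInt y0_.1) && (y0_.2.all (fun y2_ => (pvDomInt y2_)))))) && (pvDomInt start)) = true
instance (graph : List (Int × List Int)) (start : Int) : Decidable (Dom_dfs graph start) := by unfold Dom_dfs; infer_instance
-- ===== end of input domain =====

-- B separates the traversal from back-edge detection (dict-indexed second pass over the edges);
-- equivalence of the RETURN value is what is proved (A mutates nothing observable).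

-- ===== PORT A =====
-- the while loop; the stack is kept top-first (Python's list.pop() pops the end = our head;
-- stack.append inside the for-loop is a cons, so iterating the descending-sorted neighbors
-- in order reproduces Python's final stack exactly).  Fuel: each iteration strictly decreases
-- stack.length + Σ_{unvisited keys} (2 + degree), so the fuel dfs supplies is never exhausted.
def dfsLoopA (graph : List (Int × List Int)) :
    Nat → List Int → PySem.Set (Int × Int) → List Int → List Int × PySem.Set (Int × Int)
  | 0, visited, back, _ => (visited, back)
  | _ + 1, visited, back, [] => (visited, back)
  | fuel + 1, visited, back, node :: stack =>
      if node ∈ visited then dfsLoopA graph fuel visited back stack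
      else
        let visited' := visited ++ [node]
        let sb := (PySem.List.sorted (PySem.Dict.getD (PySem.Dict.mk graph) node []) (fun x => x) true).foldl
          (fun (sb : List Int × PySem.Set (Int × Int)) neighbor =>
            if neighbor ∈ visited' then
              -- edge = tuple(sorted((node, neighbor))) — exact for a 2-tuple
              (sb.1, PySem.Set.add sb.2
                (if node ≤ neighbor then (node, neighbor) else (neighbor, node)))
            else (neighbor :: sb.1, sb.2))
          (stack, back)
        dfsLoopA graph fuel visited' sb.2 sb.1

def dfs (graph : List (Int × List Int)) (start : Int) : List Int × (List (Int × Int)) :=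
  let fuel := 2 + graph.foldl (fun acc p => acc + 2 + p.2.length) 0
  let r := dfsLoopA graph fuel [] [] [start]
  -- sorted(list(back_edges)) : tuples compare lexicographically
  (r.1, PySem.List.sorted2 r.2 Prod.fst Prod.snd false)

-- ===== PORT B =====
-- phase 1: same traversal, but membership via the dict pos (node ↦ its index in visited)
def dfsVisitB (graph : List (Int × List Int)) :
    Nat → List Int → PySem.Dict Int Int → List Int → List Int × PySem.Dict Int Int
  | 0, visited, pos, _ => (visited, pos)
  | _ + 1, visited, pos, [] => (visited, pos)
  | fuel + 1, visited, pos, node :: stack =>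
      if (PySem.Dict.get? pos node).isSome then dfsVisitB graph fuel visited pos stack
      else
        let pos' := PySem.Dict.insert pos node (visited.length : Int)
        let stack' := (PySem.List.sorted (PySem.Dict.getD (PySem.Dict.mk graph) node []) (fun x => x) true).foldl
          (fun s neighbor => if (PySem.Dict.get? pos' neighbor).isSome then s else neighbor :: s)
          stack
        dfsVisitB graph fuel (visited ++ [node]) pos' stack'

def dfs_alt (graph : List (Int × List Int)) (start : Int) : List Int × (List (Int × Int)) :=
  let fuel := 2 + graph.foldl (fun acc p => acc + 2 + p.2.length) 0
  let vp := dfsVisitB graph fuel [] PySem.Dict.empty [start]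
  -- phase 2: 'if neighbor in pos and pos[neighbor] <= pos[node]'; pos[node] always succeeds
  -- (node ∈ visited), ported as getD with default 0
  let back := vp.1.foldl
    (fun (b : PySem.Set (Int × Int)) node =>
      (PySem.Dict.getD (PySem.Dict.mk graph) node []).foldl
        (fun (b : PySem.Set (Int × Int)) neighbor =>
          match PySem.Dict.get? vp.2 neighbor with
          | some pn =>
              if pn ≤ PySem.Dict.getD vp.2 node 0 then
                PySem.Set.add b
                  (if node ≤ neighbor then (node, neighbor) else (neighbor, node))
              else b
          | none => b)
        b)
    []
  (vp.1, PySem.List.sorted2 back Prod.fst Prod.snd false)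

-- ===== PRECONDITION & SPEC =====
def Spec_dfs (graph : List (Int × List Int)) (start : Int) (out : List Int × (List (Int × Int))) : Prop := out = dfs_alt graph start
instance (graph : List (Int × List Int)) (start : Int) (out : List Int × (List (Int × Int))) : Decidable (Spec_dfs graph start out) := by unfold Spec_dfs; infer_instance

-- ===== CLAIM (what is proved, stated in full; the proofs are below) =====
def Claim_equal_dfs : Prop := ∀ (graph : List (Int × List Int)) (start : Int), Dom_dfs graph start → Spec_dfs graph start (dfs graph start)

-- ===== LEMMAS AND PROOFS =====

-- the common reference traversal (visit order only)
def visitLoop (graph : List (Int × List Int)) : Nat → List Int → List Int → List Int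
  | 0, visited, _ => visited
  | _ + 1, visited, [] => visited
  | fuel + 1, visited, node :: stack =>
      if node ∈ visited then visitLoop graph fuel visited stack
      else
        let visited' := visited ++ [node]
        visitLoop graph fuel visited'
          ((PySem.List.sorted (PySem.Dict.getD (PySem.Dict.mk graph) node []) (fun x => x) true).foldl
            (fun s neighbor => if neighbor ∈ visited' then s else neighbor :: s) stack)

def sp (a b : Int) : Int × Int := if a ≤ b then (a, b) else (b, a)

-- an edge recorded by A, relative to the final visit order V: source at index i ≥ lo,
-- target at an index j ≤ i
def EdgeAt (graph : List (Int × List Int)) (V : List Int) (lo : Nat) (e : Int × Int) : Prop :=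
  ∃ i j u n, lo ≤ i ∧ j ≤ i ∧ V[i]? = some u ∧ V[j]? = some n ∧
    n ∈ PySem.Dict.getD (PySem.Dict.mk graph) u [] ∧ e = sp u n

def PosInv (v : List Int) (pos : PySem.Dict Int Int) : Prop :=
  ∀ n : Int, PySem.Dict.get? pos n = (PySem.List.index? v n).map (fun k => (k : Int))

theorem mem_foldl_step {α : Type} (l : List α)
    (step : PySem.Set (Int × Int) → α → PySem.Set (Int × Int)) (Q : α → Int × Int → Prop)
    (h : ∀ b x, x ∈ l → ∀ e, e ∈ step b x ↔ e ∈ b ∨ Q x e) :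
    ∀ b e, e ∈ l.foldl step b ↔ e ∈ b ∨ ∃ x ∈ l, Q x e := by
  induction l with
  | nil => simp
  | cons y t ih =>
    intro b e
    simp only [List.foldl_cons]
    rw [ih (fun b x hx => h b x (by simp [hx])) (step b y) e,
        h b y (by simp) e]
    simp only [List.mem_cons]
    constructor
    · rintro ((hb | hq) | ⟨x, hx, hq⟩)
      · exact Or.inl hb
      · exact Or.inr ⟨y, Or.inl rfl, hq⟩
      · exact Or.inr ⟨x, Or.inr hx, hq⟩
    · rintro (hb | ⟨x, (rfl | hx), hq⟩)
      · exact Or.inl (Or.inl hb)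
      · exact Or.inl (Or.inr hq)
      · exact Or.inr ⟨x, hx, hq⟩

theorem nodup_foldl_step {α : Type} (l : List α)
    (step : PySem.Set (Int × Int) → α → PySem.Set (Int × Int))
    (h : ∀ b x, x ∈ l → b.Nodup → (step b x).Nodup) :
    ∀ b, b.Nodup → (l.foldl step b).Nodup := by
  induction l with
  | nil => intro b hb; simpa using hb
  | cons y t ih =>
    intro b hb
    simp only [List.foldl_cons]
    exact ih (fun b x hx => h b x (by simp [hx])) _ (h b y (by simp) hb)

theorem nodup_set_add (s : PySem.Set (Int × Int)) (x : Int × Int) (h : s.Nodup) :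
    (PySem.Set.add s x).Nodup := by
  unfold PySem.Set.add
  split
  · exact h
  · next hc =>
    have hx : x ∉ s := by
      intro hm
      exact hc (by simpa [PySem.Set.contains] using hm)
    exact List.Nodup.append h (List.nodup_singleton x) (by simp [List.disjoint_singleton, hx])

theorem visitLoop_prefix (graph : List (Int × List Int)) :
    ∀ (fuel : Nat) (v s : List Int), v <+: visitLoop graph fuel v s := by
  intro fuel
  induction fuel with
  | zero => intro v s; simp [visitLoop]
  | succ f ih =>
    intro v s
    cases s with
    | nil => simp [visitLoop]
    | cons node st =>
      simp only [visitLoop]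
      split
      · exact ih v st
      · exact (List.prefix_append v [node]).trans (ih _ _)

theorem visitLoop_nodup (graph : List (Int × List Int)) :
    ∀ (fuel : Nat) (v s : List Int), v.Nodup → (visitLoop graph fuel v s).Nodup := by
  intro fuel
  induction fuel with
  | zero => intro v s h; simpa [visitLoop] using h
  | succ f ih =>
    intro v s h
    cases s with
    | nil => simpa [visitLoop] using h
    | cons node st =>
      simp only [visitLoop]
      split
      · exact ih v st h
      · next hnode =>
        exact ih _ _ (List.Nodup.append h (List.nodup_singleton node)
          (by simp [List.disjoint_singleton, hnode]))

theorem foldA_split (v' : List Int) (node : Int) (l : List Int) :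
    ∀ (st : List Int) (b : PySem.Set (Int × Int)),
      l.foldl (fun (sb : List Int × PySem.Set (Int × Int)) neighbor =>
        if neighbor ∈ v' then
          (sb.1, PySem.Set.add sb.2
            (if node ≤ neighbor then (node, neighbor) else (neighbor, node)))
        else (neighbor :: sb.1, sb.2)) (st, b)
      = (l.foldl (fun s neighbor => if neighbor ∈ v' then s else neighbor :: s) st,
         l.foldl (fun b neighbor => if neighbor ∈ v' then
             PySem.Set.add b (if node ≤ neighbor then (node, neighbor) else (neighbor, node))
           else b) b) := by
  induction l with
  | nil => intro st b; rfl
  | cons y t ih =>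
    intro st b
    simp only [List.foldl_cons]
    by_cases hy : y ∈ v' <;> simp [hy, ih]

theorem loopA_fst (graph : List (Int × List Int)) :
    ∀ (fuel : Nat) (v : List Int) (b : PySem.Set (Int × Int)) (s : List Int),
      (dfsLoopA graph fuel v b s).1 = visitLoop graph fuel v s := by
  intro fuel
  induction fuel with
  | zero => intro v b s; simp [dfsLoopA, visitLoop]
  | succ f ih =>
    intro v b s
    cases s with
    | nil => simp [dfsLoopA, visitLoop]
    | cons node st =>
      simp only [dfsLoopA, visitLoop]
      split
      · exact ih v b st
      · rw [foldA_split]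
        exact ih _ _ _

theorem edgeAt_out (graph : List (Int × List Int)) (V : List Int) (lo : Nat)
    (hlo : V.length ≤ lo) (e : Int × Int) : ¬ EdgeAt graph V lo e := by
  rintro ⟨i, j, u, n, hloi, hji, hu, hn, hadj, he⟩
  have hi := (List.getElem?_eq_some_iff.mp hu).1
  omega

theorem edgeAt_step (graph : List (Int × List Int)) (V v : List Int) (node : Int)
    (hpre : (v ++ [node]) <+: V) (e : Int × Int) :
    EdgeAt graph V v.length e ↔
      (∃ n ∈ PySem.Dict.getD (PySem.Dict.mk graph) node [], n ∈ v ++ [node] ∧ e = sp node n) ∨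
      EdgeAt graph V (v.length + 1) e := by
  obtain ⟨t, rfl⟩ := hpre
  have hVlen : (v ++ [node]).length = v.length + 1 := by simp
  have hVi : ((v ++ [node]) ++ t)[v.length]? = some node := by
    rw [List.getElem?_append_left (by omega), List.getElem?_concat_length]
  constructor
  · rintro ⟨i, j, u, n, hloi, hji, hu, hn, hadj, he⟩
    rcases Nat.lt_or_ge i (v.length + 1) with hlt | hge
    · have hieq : i = v.length := by omega
      subst hieq
      have hu' : u = node := by rw [hVi] at hu; exact (Option.some_inj.mp hu).symm
      rw [hu'] at hadj he
      refine Or.inl ⟨n, hadj, ?_, he⟩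
      have hj' : ((v ++ [node]) ++ t)[j]? = (v ++ [node])[j]? := by
        rw [List.getElem?_append_left (by omega)]
      rw [hj'] at hn
      exact List.mem_of_getElem? hn
    · exact Or.inr ⟨i, j, u, n, hge, hji, hu, hn, hadj, he⟩
  · rintro (⟨n, hadj, hmem, he⟩ | ⟨i, j, u, n, hloi, hji, hu, hn, hadj, he⟩)
    · obtain ⟨j, hj, hjn⟩ := List.getElem_of_mem hmem
      refine ⟨v.length, j, node, n, le_refl _, by omega, hVi, ?_, hadj, he⟩
      rw [List.getElem?_append_left (by omega), List.getElem?_eq_getElem hj, hjn]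
    · exact ⟨i, j, u, n, by omega, hji, hu, hn, hadj, he⟩

theorem loopA_back (graph : List (Int × List Int)) :
    ∀ (fuel : Nat) (v : List Int) (b : PySem.Set (Int × Int)) (s : List Int) (e : Int × Int),
      (e ∈ (dfsLoopA graph fuel v b s).2 ↔
        e ∈ b ∨ EdgeAt graph (visitLoop graph fuel v s) v.length e) := by
  intro fuel
  induction fuel with
  | zero =>
    intro v b s e
    simp only [dfsLoopA, visitLoop]
    have := edgeAt_out graph v v.length (le_refl _) e
    tauto
  | succ f ih =>
    intro v b s e
    cases s with
    | nil =>
      simp only [dfsLoopA, visitLoop]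
      have := edgeAt_out graph v v.length (le_refl _) e
      tauto
    | cons node st =>
      simp only [dfsLoopA, visitLoop]
      split
      · exact ih v b st e
      · next hnode =>
        rw [foldA_split]
        rw [ih _ _ _ e]
        have hmem := mem_foldl_step
          (PySem.List.sorted (PySem.Dict.getD (PySem.Dict.mk graph) node []) (fun x => x) true)
          (fun b neighbor => if neighbor ∈ v ++ [node] then
             PySem.Set.add b (if node ≤ neighbor then (node, neighbor) else (neighbor, node))
           else b)
          (fun neighbor e => neighbor ∈ v ++ [node] ∧ e = sp node neighbor)
          (by
            intro b x hx e
            by_cases hxv : x ∈ v ++ [node]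
            · simp only [if_pos hxv, PySem.Set.mem_add, sp]
              tauto
            · simp only [if_neg hxv]
              tauto)
          b e
        rw [hmem]
        have hstep := edgeAt_step graph
          (visitLoop graph f (v ++ [node])
            ((PySem.List.sorted (PySem.Dict.getD (PySem.Dict.mk graph) node []) (fun x => x) true).foldl
              (fun s neighbor => if neighbor ∈ v ++ [node] then s else neighbor :: s) st))
          v node (visitLoop_prefix graph f _ _) e
        have hlen : (v ++ [node]).length = v.length + 1 := by simp
        rw [hlen, hstep]
        simp only [PySem.List.mem_sorted]
        rw [or_assoc]

theorem loopA_back_nodup (graph : List (Int × List Int)) :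
    ∀ (fuel : Nat) (v : List Int) (b : PySem.Set (Int × Int)) (s : List Int),
      b.Nodup → (dfsLoopA graph fuel v b s).2.Nodup := by
  intro fuel
  induction fuel with
  | zero => intro v b s h; simpa [dfsLoopA] using h
  | succ f ih =>
    intro v b s h
    cases s with
    | nil => simpa [dfsLoopA] using h
    | cons node st =>
      simp only [dfsLoopA]
      split
      · exact ih v b st h
      · rw [foldA_split]
        refine ih _ _ _ (nodup_foldl_step _ _ ?_ b h)
        intro b x hx hb
        split
        · exact nodup_set_add b _ hb
        · exact hb

theorem isSome_map_index (xs : List Int) (n : Int) :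
    ((PySem.List.index? xs n).map (fun k => (k : Int))).isSome = true ↔ n ∈ xs := by
  rw [← PySem.List.index?_isSome_iff xs n]
  cases PySem.List.index? xs n <;> simp

theorem visitB_spec (graph : List (Int × List Int)) :
    ∀ (fuel : Nat) (v : List Int) (pos : PySem.Dict Int Int) (s : List Int),
      PosInv v pos →
      (dfsVisitB graph fuel v pos s).1 = visitLoop graph fuel v s ∧
      PosInv (visitLoop graph fuel v s) (dfsVisitB graph fuel v pos s).2 := by
  intro fuel
  induction fuel with
  | zero => intro v pos s h; exact ⟨rfl, h⟩
  | succ f ih =>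
    intro v pos s hInv
    cases s with
    | nil => exact ⟨rfl, hInv⟩
    | cons node st =>
      have hbool : (PySem.Dict.get? pos node).isSome = true ↔ node ∈ v := by
        rw [hInv node, isSome_map_index]
      by_cases hv : node ∈ v
      · simp only [dfsVisitB, visitLoop, if_pos (hbool.mpr hv), if_pos hv]
        exact ih v pos st hInv
      · have hb : ¬ (PySem.Dict.get? pos node).isSome = true := fun h => hv (hbool.mp h)
        simp only [dfsVisitB, visitLoop, if_neg hb, if_neg hv]
        have hInv' : PosInv (v ++ [node]) (PySem.Dict.insert pos node (v.length : Int)) := by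
          intro n
          rw [PySem.Dict.get?_insert]
          by_cases hn : n = node
          · subst hn
            rw [if_pos rfl, PySem.List.index?_append_singleton_self v n hv]
            rfl
          · rw [if_neg hn, hInv n]
            by_cases hmem : n ∈ v
            · rw [PySem.List.index?_append_of_mem _ hmem]
            · rw [(PySem.List.index?_eq_none_iff v n).mpr hmem,
                  (PySem.List.index?_eq_none_iff _ n).mpr (by simp [hmem, hn])]
        have hstack : (PySem.List.sorted (PySem.Dict.getD (PySem.Dict.mk graph) node []) (fun x => x) true).foldl
              (fun s neighbor =>
                if (PySem.Dict.get? (PySem.Dict.insert pos node (v.length : Int)) neighbor).isSome then s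
                else neighbor :: s) st
            = (PySem.List.sorted (PySem.Dict.getD (PySem.Dict.mk graph) node []) (fun x => x) true).foldl
              (fun s neighbor => if neighbor ∈ v ++ [node] then s else neighbor :: s) st := by
          apply PySem.List.foldl_congr_mem
          intro acc x hx
          have : (PySem.Dict.get? (PySem.Dict.insert pos node (v.length : Int)) x).isSome = true
              ↔ x ∈ v ++ [node] := by
            rw [hInv' x, isSome_map_index]
          by_cases hmem : x ∈ v ++ [node]
          · rw [if_pos (this.mpr hmem), if_pos hmem]
          · rw [if_neg (fun h => hmem (this.mp h)), if_neg hmem]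
        rw [hstack]
        exact ih _ _ _ hInv'

theorem index?_of_getElem?_nodup (V : List Int) (h : V.Nodup) {i : Nat} {u : Int}
    (hu : V[i]? = some u) : PySem.List.index? V u = some i := by
  obtain ⟨hi, hgu⟩ := List.getElem?_eq_some_iff.mp hu
  rw [PySem.List.index?_eq_some_iff]
  refine ⟨V.take i, V.drop (i + 1), ?_, by simp [Nat.min_eq_left (le_of_lt hi)], ?_⟩
  · conv_lhs => rw [← List.take_append_drop i V]
    rw [List.drop_eq_getElem_cons hi, hgu]
  · intro hmem
    obtain ⟨j, hj, hje⟩ := List.getElem_of_mem hmem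
    have hjlen : j < V.length := by
      have := List.length_take_le i V
      omega
    have hji : j < i := by
      have : (V.take i).length = i := by simp [Nat.min_eq_left (le_of_lt hi)]
      omega
    rw [List.getElem_take] at hje
    have : j = i := (List.Nodup.getElem_inj_iff h).mp (by rw [hje, hgu])
    omega

theorem back_iff (graph : List (Int × List Int)) (V : List Int) (pos : PySem.Dict Int Int)
    (hnd : V.Nodup) (hInv : PosInv V pos) (e : Int × Int) :
    EdgeAt graph V 0 e ↔ ∃ u ∈ V, ∃ n ∈ PySem.Dict.getD (PySem.Dict.mk graph) u [],
      (∃ pn, PySem.Dict.get? pos n = some pn ∧ pn ≤ PySem.Dict.getD pos u 0) ∧ e = sp u n := by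
  constructor
  · rintro ⟨i, j, u, n, -, hji, hu, hn, hadj, he⟩
    have hiu := index?_of_getElem?_nodup V hnd hu
    have hjn := index?_of_getElem?_nodup V hnd hn
    refine ⟨u, List.mem_of_getElem? hu, n, hadj, ⟨(j : Int), ?_, ?_⟩, he⟩
    · rw [hInv n, hjn]; rfl
    · rw [PySem.Dict.getD_eq_get?_getD, hInv u, hiu]
      simpa using Int.ofNat_le.mpr hji
  · rintro ⟨u, huV, n, hadj, ⟨pn, hpn, hle⟩, he⟩
    have hiu : ∃ iu, PySem.List.index? V u = some iu := by
      have := (PySem.List.index?_isSome_iff V u).mpr huV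
      exact Option.isSome_iff_exists.mp this
    obtain ⟨iu, hiu⟩ := hiu
    have hpn' := hpn
    rw [hInv n] at hpn'
    obtain ⟨jn, hjn, hpneq⟩ : ∃ jn, PySem.List.index? V n = some jn ∧ pn = (jn : Int) := by
      cases hidx : PySem.List.index? V n with
      | none => rw [hidx] at hpn'; simp at hpn'
      | some k => rw [hidx] at hpn'; exact ⟨k, rfl, (Option.some_inj.mp hpn'.symm)⟩
    have hgd : PySem.Dict.getD pos u 0 = (iu : Int) := by
      rw [PySem.Dict.getD_eq_get?_getD, hInv u, hiu]; rfl
    rw [hpneq, hgd] at hle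
    have hjile : jn ≤ iu := by exact_mod_cast hle
    obtain ⟨hiu_lt, hgu, -⟩ := PySem.List.getElem_of_index?_eq_some hiu
    obtain ⟨hjn_lt, hgn, -⟩ := PySem.List.getElem_of_index?_eq_some hjn
    exact ⟨iu, jn, u, n, Nat.zero_le _, hjile,
      by rw [List.getElem?_eq_getElem hiu_lt, hgu],
      by rw [List.getElem?_eq_getElem hjn_lt, hgn], hadj, he⟩

theorem sorted2_eq_lex (xs : List (Int × Int)) :
    PySem.List.sorted2 xs Prod.fst Prod.snd false
      = PySem.List.sorted xs (fun p => toLex p) false := by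
  unfold PySem.List.sorted2 PySem.List.sorted
  show List.foldl (fun acc x => PySem.List.insertBy
      (fun a b => decide (a.1 < b.1) || (!decide (b.1 < a.1) && decide (a.2 < b.2))) x acc) [] xs
    = List.foldl (fun acc x => PySem.List.insertBy
      (fun a b => decide (toLex a < toLex b)) x acc) [] xs
  congr 1
  funext acc x
  congr 1
  funext a b
  rw [Bool.eq_iff_iff]
  simp only [Bool.or_eq_true, Bool.and_eq_true, Bool.not_eq_true', decide_eq_true_eq,
    decide_eq_false_iff_not, Prod.Lex.toLex_lt_toLex]
  omega

theorem sorted2_congr_perm (xs ys : List (Int × Int)) (h : xs.Perm ys) :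
    PySem.List.sorted2 xs Prod.fst Prod.snd false
      = PySem.List.sorted2 ys Prod.fst Prod.snd false := by
  rw [sorted2_eq_lex, sorted2_eq_lex]
  exact PySem.List.sorted_eq_sorted_of_perm xs ys _ toLex.injective h

theorem backB_mem (graph : List (Int × List Int)) (V : List Int) (pos : PySem.Dict Int Int)
    (b0 : PySem.Set (Int × Int)) (e : Int × Int) :
    e ∈ V.foldl (fun (b : PySem.Set (Int × Int)) node =>
        (PySem.Dict.getD (PySem.Dict.mk graph) node []).foldl
          (fun (b : PySem.Set (Int × Int)) neighbor =>
            match PySem.Dict.get? pos neighbor with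
            | some pn =>
                if pn ≤ PySem.Dict.getD pos node 0 then
                  PySem.Set.add b
                    (if node ≤ neighbor then (node, neighbor) else (neighbor, node))
                else b
            | none => b) b) b0
    ↔ e ∈ b0 ∨ ∃ u ∈ V, ∃ n ∈ PySem.Dict.getD (PySem.Dict.mk graph) u [],
        (∃ pn, PySem.Dict.get? pos n = some pn ∧ pn ≤ PySem.Dict.getD pos u 0) ∧ e = sp u n := by
  apply mem_foldl_step V _
    (fun u e => ∃ n ∈ PySem.Dict.getD (PySem.Dict.mk graph) u [],
      (∃ pn, PySem.Dict.get? pos n = some pn ∧ pn ≤ PySem.Dict.getD pos u 0) ∧ e = sp u n)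
  intro b u _ e
  apply mem_foldl_step (PySem.Dict.getD (PySem.Dict.mk graph) u []) _
    (fun n e => (∃ pn, PySem.Dict.get? pos n = some pn ∧ pn ≤ PySem.Dict.getD pos u 0) ∧ e = sp u n)
  intro b n _ e
  cases hpn : PySem.Dict.get? pos n with
  | none => simp
  | some pn =>
    by_cases hle : pn ≤ PySem.Dict.getD pos u 0
    · simp only [if_pos hle, PySem.Set.mem_add, sp]
      constructor
      · rintro (hb | rfl)
        · exact Or.inl hb
        · exact Or.inr ⟨⟨pn, rfl, hle⟩, rfl⟩
      · rintro (hb | ⟨-, rfl⟩)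
        · exact Or.inl hb
        · exact Or.inr rfl
    · simp only [if_neg hle]
      constructor
      · exact Or.inl
      · rintro (hb | ⟨⟨pn', hpn', hle'⟩, rfl⟩)
        · exact hb
        · exact absurd ((Option.some_inj.mp hpn') ▸ hle') hle

theorem backB_nodup (graph : List (Int × List Int)) (V : List Int) (pos : PySem.Dict Int Int)
    (b0 : PySem.Set (Int × Int)) (h : b0.Nodup) :
    (V.foldl (fun (b : PySem.Set (Int × Int)) node =>
        (PySem.Dict.getD (PySem.Dict.mk graph) node []).foldl
          (fun (b : PySem.Set (Int × Int)) neighbor =>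
            match PySem.Dict.get? pos neighbor with
            | some pn =>
                if pn ≤ PySem.Dict.getD pos node 0 then
                  PySem.Set.add b
                    (if node ≤ neighbor then (node, neighbor) else (neighbor, node))
                else b
            | none => b) b) b0).Nodup := by
  refine nodup_foldl_step V _ ?_ b0 h
  intro b u _ hb
  refine nodup_foldl_step _ _ ?_ b hb
  intro b n _ hb
  cases PySem.Dict.get? pos n with
  | none => exact hb
  | some pn =>
    dsimp only
    split
    · exact nodup_set_add b _ hb
    · exact hb

-- ===== VERDICT (by name: the statement is the Claim_ definition above) =====
theorem dfs_spec : Claim_equal_dfs := by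
  intro graph start _
  show dfs graph start = dfs_alt graph start
  simp only [dfs, dfs_alt]
  have hInv0 : PosInv [] PySem.Dict.empty := by
    intro n
    rw [PySem.Dict.get?_empty, (PySem.List.index?_eq_none_iff [] n).mpr (by simp)]
    rfl
  set fuel := 2 + graph.foldl (fun acc p => acc + 2 + p.2.length) 0 with hfuel
  obtain ⟨h1, h2⟩ := visitB_spec graph fuel [] PySem.Dict.empty [start] hInv0
  set V := visitLoop graph fuel [] [start] with hV
  have hndV : V.Nodup := visitLoop_nodup graph fuel [] [start] (by simp)
  have hfst : (dfsLoopA graph fuel [] [] [start]).1 = V := loopA_fst graph fuel [] [] [start]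
  have hperm : (dfsLoopA graph fuel [] [] [start]).2.Perm
      ((dfsVisitB graph fuel [] PySem.Dict.empty [start]).1.foldl
        (fun (b : PySem.Set (Int × Int)) node =>
          (PySem.Dict.getD (PySem.Dict.mk graph) node []).foldl
            (fun (b : PySem.Set (Int × Int)) neighbor =>
              match PySem.Dict.get? (dfsVisitB graph fuel [] PySem.Dict.empty [start]).2 neighbor with
              | some pn =>
                  if pn ≤ PySem.Dict.getD (dfsVisitB graph fuel [] PySem.Dict.empty [start]).2 node 0 then
                    PySem.Set.add b
                      (if node ≤ neighbor then (node, neighbor) else (neighbor, node))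
                  else b
              | none => b) b) []) := by
    rw [List.perm_ext_iff_of_nodup
      (loopA_back_nodup graph fuel [] [] [start] (by simp))
      (backB_nodup graph _ _ [] (by simp))]
    intro e
    rw [loopA_back graph fuel [] [] [start] e, backB_mem, h1]
    simp only [List.mem_nil_iff, false_or, List.length_nil]
    exact back_iff graph V _ hndV h2 e
  rw [h1] at hperm
  rw [h1, hfst]
  exact Prod.ext rfl (sorted2_congr_perm _ _ hperm)
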